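-- pv_equiv track=rewrite | github.com/Ryanl2000/PythonSubject | DSAAmiddle/Light.py | MinLightGreedy
-- ===== SOURCE A (Python) =====
-- def MinLightGreedy(str):  #贪心算法
--     index = 0
--     light = 0
--     while index < len(str):
--         if str[index] == 'X':
--             index += 1
--             continue
--         light += 1
--         if index + 1 == len(str):
--             break
--         elif str[index + 1] == 'X':
--             index += 2
--         else:
--             index += 3
--     return light
-- ===== SOURCE B (Python) =====
-- def MinLightGreedy(str):
--     # One pass: count run lengths of non-'X' characters; each run of length
--     # L needs ceil(L/3) = (L + 2) // 3 lights.
--     total = 0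
--     run = 0
--     for ch in str:
--         if ch == 'X':
--             total += (run + 2) // 3
--             run = 0
--         else:
--             run += 1
--     return total + (run + 2) // 3
-- ===== Notes on version B (the rewrite author's own statement) =====
-- stated objective: faster
-- what changed: Replaces A's variable-step pointer walk (jumping 1/2/3 positions with repeated indexing and len() calls) by a single uniform pass over the characters that accumulates run lengths of non-'X' characters and adds the closed-form ceil(L/3) = (L+2)//3 lights per run.
import Mathlib
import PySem

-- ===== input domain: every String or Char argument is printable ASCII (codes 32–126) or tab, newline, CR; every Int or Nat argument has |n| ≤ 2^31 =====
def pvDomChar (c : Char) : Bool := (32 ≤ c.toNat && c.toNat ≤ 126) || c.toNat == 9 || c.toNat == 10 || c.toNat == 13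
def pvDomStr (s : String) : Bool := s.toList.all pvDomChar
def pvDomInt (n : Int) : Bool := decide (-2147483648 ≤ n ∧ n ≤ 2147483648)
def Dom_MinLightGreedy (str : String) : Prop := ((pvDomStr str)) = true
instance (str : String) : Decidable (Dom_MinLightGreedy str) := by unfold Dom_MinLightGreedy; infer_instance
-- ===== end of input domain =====

-- B replaces A's variable-step pointer walk by one uniform pass that accumulates run lengths
-- of non-'X' characters and adds (L + 2) // 3 lights per run (alternative decomposition).

-- ===== PORT A =====
-- A's while loop: index advances by 1 (on 'X'), 2 (light, next is 'X') or 3 (light, next not 'X').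
def pvLoopA (cs : List Char) (index : Nat) (light : Int) : Int :=
  if h : index < cs.length then
    if cs.getD index ' ' == 'X' then
      pvLoopA cs (index + 1) light
    else
      let light := light + 1
      if index + 1 = cs.length then light
      else if cs.getD (index + 1) ' ' == 'X' then pvLoopA cs (index + 2) light
      else pvLoopA cs (index + 3) light
  else light
termination_by cs.length - index
decreasing_by all_goals omega

def MinLightGreedy (str : String) : Int := pvLoopA str.toList 0 0

-- ===== PORT B =====
-- Source B's for loop as a fold over the characters, state (total, run).
def MinLightGreedy_alt (str : String) : Int :=
  let p := str.toList.foldl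
    (fun (p : Int × Int) ch =>
      if ch == 'X' then (p.1 + PySem.Int.floordiv (p.2 + 2) 3, 0) else (p.1, p.2 + 1))
    (0, 0)
  p.1 + PySem.Int.floordiv (p.2 + 2) 3

-- ===== PRECONDITION & SPEC =====
def Spec_MinLightGreedy (str : String) (out : Int) : Prop := out = MinLightGreedy_alt str
instance (str : String) (out : Int) : Decidable (Spec_MinLightGreedy str out) := by unfold Spec_MinLightGreedy; infer_instance

-- ===== CLAIM (what is proved, stated in full; the proofs are below) =====
def Claim_equal_MinLightGreedy : Prop := ∀ (str : String), Dom_MinLightGreedy str → Spec_MinLightGreedy str (MinLightGreedy str)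

-- ===== LEMMAS AND PROOFS =====

def pvG : List Char → Int
  | [] => 0
  | c :: r =>
    if c == 'X' then pvG r
    else
      match r with
      | [] => 1
      | d :: r' => if d == 'X' then 1 + pvG r' else 1 + pvG r'.tail
termination_by cs => cs.length
decreasing_by all_goals (simp only [List.length_tail, List.length_cons]; omega)

def pvB : List Char → Int → Int
  | [], run => PySem.Int.floordiv (run + 2) 3
  | c :: r, run =>
    if c == 'X' then PySem.Int.floordiv (run + 2) 3 + pvB r 0
    else pvB r (run + 1)

theorem pvFdiv_add_three (r : Int) :
    PySem.Int.floordiv (r + 3 + 2) 3 = PySem.Int.floordiv (r + 2) 3 + 1 := by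
  rw [PySem.Int.floordiv_eq_ediv_of_pos (by omega), PySem.Int.floordiv_eq_ediv_of_pos (by omega)]
  omega

theorem pvB_add_three (cs : List Char) (run : Int) :
    pvB cs (run + 3) = 1 + pvB cs run := by
  induction cs generalizing run with
  | nil => simp only [pvB, pvFdiv_add_three]; ring
  | cons c r ih =>
    simp only [pvB]
    split_ifs with h
    · rw [pvFdiv_add_three]; ring
    · have : run + 3 + 1 = (run + 1) + 3 := by ring
      rw [this, ih]

theorem pvFdiv4 : PySem.Int.floordiv 4 3 = 1 := by decide

theorem pvG_eq_pvB (cs : List Char) : pvG cs = pvB cs 0 := by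
  induction cs using pvG.induct with
  | case1 => simp [pvG, pvB]
  | case2 c r h ih =>
    rw [pvG.eq_def]
    simp [pvB, h, ih]
  | case3 c h => simp [pvG, pvB, h]
  | case4 c h d r' hd ih => simp [pvG, pvB, h, hd, ih]
  | case5 c h d r' hd ih =>
    simp only [pvG, pvB, h, hd, Bool.false_eq_true, if_false]
    cases r' with
    | nil =>
      simp [pvG, pvB]
    | cons e r'' =>
      simp only [List.tail_cons] at ih ⊢
      by_cases he : e == 'X'
      · simp only [pvB, he, if_true]
        rw [show ((0:Int)+1+1+2) = 4 by norm_num, pvFdiv4, ih]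
      · simp only [pvB, he, Bool.false_eq_true, if_false]
        rw [show ((0:Int)+1+1+1) = 0+3 by norm_num, pvB_add_three, ih]

theorem pvG_cons_X (c : Char) (r : List Char) (h : (c == 'X') = true) : pvG (c :: r) = pvG r := by
  rw [pvG.eq_def]; simp [h]

theorem pvG_single (c : Char) (h : ¬ (c == 'X') = true) : pvG [c] = 1 := by
  rw [pvG.eq_def]; simp [h]

theorem pvG_two_X (c d : Char) (r : List Char) (hc : ¬ (c == 'X') = true)
    (hd : (d == 'X') = true) : pvG (c :: d :: r) = 1 + pvG r := by
  rw [pvG.eq_def]; simp [hc, hd]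

theorem pvG_two (c d : Char) (r : List Char) (hc : ¬ (c == 'X') = true)
    (hd : ¬ (d == 'X') = true) : pvG (c :: d :: r) = 1 + pvG r.tail := by
  rw [pvG.eq_def]; simp [hc, hd]

theorem pvLoopA_eq (cs : List Char) (index : Nat) (light : Int) :
    pvLoopA cs index light = light + pvG (cs.drop index) := by
  induction index, light using pvLoopA.induct cs with
  | case1 index light h hX ih =>
    rw [pvLoopA, dif_pos h, if_pos hX, ih]
    have hg : cs.getD index ' ' = cs[index] := List.getD_eq_getElem cs ' ' h
    rw [List.drop_eq_getElem_cons h, pvG_cons_X _ _ (by rw [← hg]; exact hX)]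
  | case2 index light h hX hend =>
    rw [pvLoopA, dif_pos h, if_neg hX, if_pos hend]
    have hg : cs.getD index ' ' = cs[index] := List.getD_eq_getElem cs ' ' h
    rw [List.drop_eq_getElem_cons h, List.drop_eq_nil_of_le (by omega),
      pvG_single _ (by rw [← hg]; exact hX)]
  | case3 index light h hX light1 hend hX2 ih =>
    rw [pvLoopA, dif_pos h, if_neg hX, if_neg hend, if_pos hX2, ih]
    have h2 : index + 1 < cs.length := by omega
    have hg : cs.getD index ' ' = cs[index] := List.getD_eq_getElem cs ' ' h
    have hg2 : cs.getD (index + 1) ' ' = cs[index + 1] := List.getD_eq_getElem cs ' ' h2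
    rw [List.drop_eq_getElem_cons h, List.drop_eq_getElem_cons h2,
      pvG_two_X _ _ _ (by rw [← hg]; exact hX) (by rw [← hg2]; exact hX2)]
    ring
  | case4 index light h hX light1 hend hX2 ih =>
    rw [pvLoopA, dif_pos h, if_neg hX, if_neg hend, if_neg hX2, ih]
    have h2 : index + 1 < cs.length := by omega
    have hg : cs.getD index ' ' = cs[index] := List.getD_eq_getElem cs ' ' h
    have hg2 : cs.getD (index + 1) ' ' = cs[index + 1] := List.getD_eq_getElem cs ' ' h2
    rw [List.drop_eq_getElem_cons h, List.drop_eq_getElem_cons h2,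
      pvG_two _ _ _ (by rw [← hg]; exact hX) (by rw [← hg2]; exact hX2)]
    have htail : (cs.drop (index + 2)).tail = cs.drop (index + 3) := by
      rw [← List.drop_one, List.drop_drop]
    rw [htail]; ring
  | case5 index light h =>
    rw [pvLoopA, dif_neg h, List.drop_eq_nil_of_le (by omega)]
    simp [pvG]

theorem pvFold_eq (cs : List Char) (t run : Int) :
    (cs.foldl (fun (p : Int × Int) ch =>
        if ch == 'X' then (p.1 + PySem.Int.floordiv (p.2 + 2) 3, 0) else (p.1, p.2 + 1))
      (t, run)).1
    + PySem.Int.floordiv ((cs.foldl (fun (p : Int × Int) ch =>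
        if ch == 'X' then (p.1 + PySem.Int.floordiv (p.2 + 2) 3, 0) else (p.1, p.2 + 1))
      (t, run)).2 + 2) 3
    = t + pvB cs run := by
  induction cs generalizing t run with
  | nil => simp [pvB]
  | cons c r ih =>
    simp only [List.foldl_cons, pvB]
    by_cases h : c == 'X'
    · simp only [h, if_true, ih]; ring
    · simp only [h, Bool.false_eq_true, if_false, ih]

-- ===== VERDICT (by name: the statement is the Claim_ definition above) =====
theorem MinLightGreedy_spec : Claim_equal_MinLightGreedy := by
  intro s _
  unfold Spec_MinLightGreedy MinLightGreedy MinLightGreedy_alt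
  have hB := pvFold_eq s.toList 0 0
  have hA := pvLoopA_eq s.toList 0 0
  simp only [List.drop_zero] at hA
  rw [hA, pvG_eq_pvB]
  simpa using hB.symm
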